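-- pv_equiv track=rewrite | github.com/ticoAg/skills | feat-wt-kickoff/scripts/todo_sync.py | _normalize_blank_lines_after_workflow_block
-- ===== SOURCE A (Python) =====
-- END_MARKER = "<!-- TODO_SYNC:END -->"
--
-- def _normalize_blank_lines_after_workflow_block(lines: list[str]) -> list[str]:
--     # Ensure there is exactly 1 blank line after END_MARKER.
--     end_idx = None
--     for idx, line in enumerate(lines):
--         if line.strip() == END_MARKER:
--             end_idx = idx
--             break
--     if end_idx is None:
--         return lines
--
--     i = end_idx + 1
--     blank_count = 0
--     while i + blank_count < len(lines) and lines[i + blank_count].strip() == "":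
--         blank_count += 1
--
--     new_lines = list(lines)
--     if blank_count == 0:
--         new_lines.insert(i, "")
--         return new_lines
--
--     # Remove extra blanks (keep exactly one).
--     for _ in range(blank_count - 1):
--         del new_lines[i + 1]
--     return new_lines
-- ===== SOURCE B (Python) =====
-- END_MARKER = "<!-- TODO_SYNC:END -->"
--
-- def _normalize_blank_lines_after_workflow_block(lines: list[str]) -> list[str]:
--     # Single-reconstruction version: find the marker, skip the blank run after
--     # it, and rebuild with exactly one blank line by slicing.
--     idx = next((k for k, l in enumerate(lines) if l.strip() == END_MARKER), None)
--     if idx is None: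
--         return lines
--     i = idx + 1
--     j = i
--     while j < len(lines) and lines[j].strip() == "":
--         j += 1
--     keep = [lines[i]] if j > i else [""]
--     return lines[:i] + keep + lines[j:]
-- ===== Notes on version B (the rewrite author's own statement) =====
-- stated objective: simpler
-- what changed: B replaces A's blank-count loop plus two mutation branches (insert for zero blanks, a del-loop for extras) with a single scan to the end of the blank run and one slice reconstruction lines[:i] + keep + lines[j:] covering both cases.
import Mathlib
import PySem

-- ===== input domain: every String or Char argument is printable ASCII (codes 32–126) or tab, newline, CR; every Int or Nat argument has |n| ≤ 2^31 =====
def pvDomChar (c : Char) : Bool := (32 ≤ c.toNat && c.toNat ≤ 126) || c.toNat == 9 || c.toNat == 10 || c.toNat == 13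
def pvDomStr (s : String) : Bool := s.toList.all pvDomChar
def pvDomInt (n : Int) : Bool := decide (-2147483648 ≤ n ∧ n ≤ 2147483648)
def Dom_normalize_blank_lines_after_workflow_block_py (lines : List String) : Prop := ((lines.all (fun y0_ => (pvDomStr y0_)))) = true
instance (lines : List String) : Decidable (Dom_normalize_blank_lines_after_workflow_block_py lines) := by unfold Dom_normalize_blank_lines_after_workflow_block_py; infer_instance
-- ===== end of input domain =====

-- B replaces A's blank-count loop plus two mutation branches (insert / del-loop) with
-- one blank-run scan and a single slice reconstruction; same return value everywhere.

def pvEndMarker : String := "<!-- TODO_SYNC:END -->"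

-- ===== PORT A =====
-- A's enumerate-with-break scan for the marker index.
def aFind : List String → Nat → Option Nat
  | [], _ => none
  | l :: ls, idx => if PySem.Str.strip l == pvEndMarker then some idx else aFind ls (idx + 1)

-- A's while loop: blank_count of consecutive blank-stripping lines starting at index pos.
def aBlanks (lines : List String) (pos : Nat) : Nat :=
  if h : pos < lines.length then
    if PySem.Str.strip lines[pos] == "" then aBlanks lines (pos + 1) + 1 else 0
  else 0
termination_by lines.length - pos

-- `del new_lines[m]`; exact for m < new_lines.length, which A's loop maintains (proved below).
def aDelAt (l : List String) (m : Nat) : List String := l.take m ++ l.drop (m + 1)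

-- A's `for _ in range(blank_count - 1): del new_lines[i + 1]` loop.
def aDelLoop : Nat → Nat → List String → List String
  | 0, _, l => l
  | n + 1, m, l => aDelLoop n m (aDelAt l m)

def normalize_blank_lines_after_workflow_block_py (lines : List String) : List String :=
  match aFind lines 0 with
  | none => lines
  | some end_idx =>
    let i := end_idx + 1
    let blank_count := aBlanks lines i
    let new_lines := lines
    if blank_count = 0 then PySem.List.insert new_lines (i : Int) ""
    else aDelLoop (blank_count - 1) (i + 1) new_lines

-- ===== PORT B =====
-- B's while loop: advance j past the blank run.
def bSkip (lines : List String) (j : Nat) : Nat :=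
  if h : j < lines.length then
    if PySem.Str.strip lines[j] == "" then bSkip lines (j + 1) else j
  else j
termination_by lines.length - j

def normalize_blank_lines_after_workflow_block_py_alt (lines : List String) : List String :=
  match lines.findIdx? (fun l => PySem.Str.strip l == pvEndMarker) with
  | none => lines
  | some idx =>
    let i := idx + 1
    let j := bSkip lines i
    -- lines[i] is only read when j > i, i.e. when index i is in range
    let keep := if j > i then [lines.getD i ""] else [""]
    lines.take i ++ keep ++ lines.drop j

-- ===== PRECONDITION & SPEC =====
def Spec_normalize_blank_lines_after_workflow_block_py (lines : List String) (out : List String) : Prop := out = normalize_blank_lines_after_workflow_block_py_alt lines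
instance (lines : List String) (out : List String) : Decidable (Spec_normalize_blank_lines_after_workflow_block_py lines out) := by unfold Spec_normalize_blank_lines_after_workflow_block_py; infer_instance

-- ===== CLAIM (what is proved, stated in full; the proofs are below) =====
def Claim_equal_normalize_blank_lines_after_workflow_block_py : Prop := ∀ (lines : List String), Dom_normalize_blank_lines_after_workflow_block_py lines → Spec_normalize_blank_lines_after_workflow_block_py lines (normalize_blank_lines_after_workflow_block_py lines)

-- ===== LEMMAS AND PROOFS =====

lemma aFind_eq (l : List String) (k : Nat) :
    aFind l k = (l.findIdx? (fun s => PySem.Str.strip s == pvEndMarker)).map (· + k) := by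
  induction l generalizing k with
  | nil => simp [aFind]
  | cons x xs ih =>
    simp only [aFind, List.findIdx?_cons]
    by_cases h : PySem.Str.strip x == pvEndMarker
    · simp [h]
    · simp only [h, Bool.false_eq_true, ite_false]
      rw [ih (k + 1)]
      cases xs.findIdx? (fun s => PySem.Str.strip s == pvEndMarker) with
      | none => simp
      | some v => simp; omega

lemma bSkip_eq (lines : List String) (pos : Nat) :
    bSkip lines pos = pos + aBlanks lines pos := by
  fun_induction aBlanks lines pos with
  | case1 p hlt hb ih => rw [bSkip]; simp only [hlt, dif_pos, hb, if_pos, ih]; omega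
  | case2 p hlt hb => rw [bSkip]; simp [hlt, hb]
  | case3 p hlt => rw [bSkip]; simp [hlt]

lemma aBlanks_le (lines : List String) (pos : Nat) :
    pos + aBlanks lines pos ≤ lines.length ∨ aBlanks lines pos = 0 := by
  fun_induction aBlanks lines pos with
  | case1 p hlt hb ih => rcases ih with ih | ih <;> left <;> omega
  | case2 p hlt hb => right; rfl
  | case3 p hlt => right; rfl

lemma aBlanks_head (lines : List String) (pos : Nat) (h : aBlanks lines pos ≠ 0) :
    pos < lines.length ∧ PySem.Str.strip (lines.getD pos "") == "" := by
  rw [aBlanks] at h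
  split at h
  · next hlt =>
    split at h
    · next hb => exact ⟨hlt, by rwa [List.getD_eq_getElem _ _ hlt]⟩
    · simp at h
  · simp at h

lemma aDelLoop_eq (n m : Nat) (pre mid rest : List String) (hpre : pre.length = m) (hmid : mid.length = n) :
    aDelLoop n m (pre ++ mid ++ rest) = pre ++ rest := by
  subst hpre
  induction n generalizing mid with
  | zero =>
    cases mid with
    | nil => simp [aDelLoop]
    | cons => simp at hmid
  | succ k ih =>
    cases mid with
    | nil => simp at hmid
    | cons x xs =>
      have hstep : aDelAt (pre ++ (x :: xs) ++ rest) pre.length = pre ++ xs ++ rest := by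
        unfold aDelAt
        rw [List.append_assoc, List.cons_append, List.take_left,
            ← List.drop_drop, List.drop_left]
        simp
      simp only [aDelLoop, hstep]
      exact ih xs (by simpa using hmid)

-- ===== VERDICT (by name: the statement is the Claim_ definition above) =====
theorem normalize_blank_lines_after_workflow_block_py_spec : Claim_equal_normalize_blank_lines_after_workflow_block_py := by
  intro lines _
  unfold Spec_normalize_blank_lines_after_workflow_block_py
  unfold normalize_blank_lines_after_workflow_block_py normalize_blank_lines_after_workflow_block_py_alt
  rw [aFind_eq]
  cases hf : lines.findIdx? (fun s => PySem.Str.strip s == pvEndMarker) with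
  | none => simp
  | some idx =>
    simp only [Option.map_some, Nat.add_zero]
    set i := idx + 1 with hi
    have hidx : idx < lines.length := (List.findIdx?_eq_some_iff_findIdx_eq.mp hf).1
    have hile : i ≤ lines.length := by omega
    rw [bSkip_eq]
    set bc := aBlanks lines i with hbc
    by_cases h0 : bc = 0
    · simp only [h0, if_pos, Nat.add_zero, gt_iff_lt, lt_irrefl, if_neg, not_false_iff]
      rw [PySem.List.insert_natCast lines i "" hile]
      simp
    · have hle : i + aBlanks lines i ≤ lines.length := (aBlanks_le lines i).resolve_right h0
      have hh := aBlanks_head lines i h0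
      obtain ⟨hlt, hblk⟩ := hh
      simp only [h0, if_neg, not_false_iff]
      have hgt : i < i + bc := by omega
      simp only [gt_iff_lt, hgt, if_pos]
      have hpre : (lines.take (i + 1)).length = i + 1 := by
        simp; omega
      have hmidlen : ((lines.drop (i + 1)).take (bc - 1)).length = bc - 1 := by
        simp; omega
      have hdecomp : lines = lines.take (i + 1) ++ ((lines.drop (i + 1)).take (bc - 1)) ++ lines.drop (i + bc) := by
        conv_lhs => rw [← List.take_append_drop (i + 1) lines]
        rw [List.append_assoc]
        congr 1
        conv_lhs => rw [← List.take_append_drop (bc - 1) (lines.drop (i + 1))]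
        congr 1
        rw [List.drop_drop]
        congr 1
        omega
      conv_lhs => rw [hdecomp]
      rw [aDelLoop_eq (bc - 1) (i + 1) _ _ _ hpre hmidlen]
      have htake : lines.take (i + 1) = lines.take i ++ [lines.getD i ""] := by
        rw [List.getD_eq_getElem _ _ hlt, List.take_add_one, List.getElem?_eq_getElem hlt]
        simp
      rw [htake]
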